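-- pv_equiv track=rewrite | github.com/zeezaayy/App-Enkripsi-Dekripsi | enkripsi_dekripsi_gui.py | decrypt
-- ===== SOURCE A (Python) =====
-- BLOCK_SIZE = 4
--
-- def decrypt(ciphertext: str, key: str) -> str:
--     if not key:
--         raise ValueError("Key tidak boleh kosong.")
--     ciphertext = ciphertext.strip()
--     if len(ciphertext) % 2 != 0:
--         raise ValueError("Ciphertext tidak valid (panjang hex harus genap).")
--     try:
--         bytes_data = bytes.fromhex(ciphertext)
--     except ValueError:
--         raise ValueError("Ciphertext mengandung karakter non-hex yang tidak valid.")
--     plaintext = ""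
--     for i in range(0, len(bytes_data), BLOCK_SIZE):
--         block = bytes_data[i:i + BLOCK_SIZE]
--         for j in range(len(block)):
--             plaintext += chr(block[j] ^ ord(key[j % len(key)]))
--     return plaintext.strip()
-- ===== SOURCE B (Python) =====
-- BLOCK_SIZE = 4
--
-- def decrypt(ciphertext: str, key: str) -> str:
--     if not key:
--         raise ValueError("Key tidak boleh kosong.")
--     ciphertext = ciphertext.strip()
--     if len(ciphertext) % 2 != 0:
--         raise ValueError("Ciphertext tidak valid (panjang hex harus genap).")
--     try:
--         bytes_data = bytes.fromhex(ciphertext)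
--     except ValueError:
--         raise ValueError("Ciphertext mengandung karakter non-hex yang tidak valid.")
--     # the block structure never matters: byte at global index g is XORed with
--     # key[(g % BLOCK_SIZE) % len(key)] -- precompute that period-4 keystream once
--     keystream = [ord(key[j % len(key)]) for j in range(BLOCK_SIZE)]
--     return ''.join(chr(b ^ keystream[g % BLOCK_SIZE]) for g, b in enumerate(bytes_data)).strip()
-- ===== Notes on version B (the rewrite author's own statement) =====
-- stated objective: simpler
-- what changed: Replaces A's block slicing with nested loops and per-byte string += by one precomputed period-4 keystream table plus a single flat enumerate/join pass over the decoded bytes.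
import Mathlib
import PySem

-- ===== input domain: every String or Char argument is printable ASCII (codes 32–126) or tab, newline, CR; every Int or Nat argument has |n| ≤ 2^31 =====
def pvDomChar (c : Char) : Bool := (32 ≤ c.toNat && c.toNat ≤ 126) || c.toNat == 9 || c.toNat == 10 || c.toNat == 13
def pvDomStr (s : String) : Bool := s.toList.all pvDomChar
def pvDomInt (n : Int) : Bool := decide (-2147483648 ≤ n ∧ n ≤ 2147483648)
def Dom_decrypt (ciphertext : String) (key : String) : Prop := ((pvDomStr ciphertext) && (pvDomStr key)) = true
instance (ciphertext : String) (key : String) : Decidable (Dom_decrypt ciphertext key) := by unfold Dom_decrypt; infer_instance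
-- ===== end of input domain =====

-- B replaces A's block slicing + nested loops + string += by a precomputed period-4
-- keystream table and one flat enumerate/join pass (objective: simpler).

-- shared library helper: bytes.fromhex (CPython 3.11 semantics on Dom characters:
-- ASCII whitespace is skipped between byte pairs, not inside one; none = ValueError)
def pvHexDigit? (c : Char) : Option Nat :=
  if '0' ≤ c ∧ c ≤ '9' then some (c.toNat - 48)
  else if 'a' ≤ c ∧ c ≤ 'f' then some (c.toNat - 87)
  else if 'A' ≤ c ∧ c ≤ 'F' then some (c.toNat - 55)
  else none

def pvIsWS (c : Char) : Bool := c == ' ' || c == '\t' || c == '\n' || c == '\r'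

def pvFromhex? : List Char → Option (List Nat)
  | [] => some []
  | c :: rest =>
    if pvIsWS c then pvFromhex? rest
    else
      match rest with
      | [] => none
      | c2 :: rest2 =>
        match pvHexDigit? c, pvHexDigit? c2, pvFromhex? rest2 with
        | some h, some l, some bs => some ((16 * h + l) :: bs)
        | _, _, _ => none

-- ===== PORT A =====
def decrypt (ciphertext : String) (key : String) : String :=
  if key.toList.isEmpty then ""   -- raise ValueError (outside Pre_)
  else
    let ct := (PySem.Str.strip ciphertext).toList
    if ct.length % 2 ≠ 0 then ""  -- raise ValueError (outside Pre_)
    else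
      match pvFromhex? ct with
      | none => ""                -- raise ValueError (outside Pre_)
      | some bytesData =>
        let kl := key.toList
        let plaintext := (PySem.List.pyRange 0 (bytesData.length : Int) 4).foldl
          (fun pt i =>
            let block := PySem.List.slice bytesData (some i) (some (i + 4))
            (List.range block.length).foldl
              (fun pt j => pt ++ [Char.ofNat ((block.getD j 0) ^^^ (kl.getD (j % kl.length) ' ').toNat)])
              pt)
          []
        PySem.Str.strip (String.ofList plaintext)

-- ===== PORT B =====
def decrypt_alt (ciphertext : String) (key : String) : String :=
  if key.toList.isEmpty then ""   -- raise ValueError (outside Pre_)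
  else
    let ct := (PySem.Str.strip ciphertext).toList
    if ct.length % 2 ≠ 0 then ""  -- raise ValueError (outside Pre_)
    else
      match pvFromhex? ct with
      | none => ""                -- raise ValueError (outside Pre_)
      | some bytesData =>
        let kl := key.toList
        let keystream := (List.range 4).map (fun j => (kl.getD (j % kl.length) ' ').toNat)
        PySem.Str.strip (String.ofList ((PySem.List.enumerate bytesData).map
          (fun p => Char.ofNat (p.2 ^^^ PySem.List.pyGetD keystream (PySem.Int.mod p.1 4) 0))))

-- ===== PRECONDITION & SPEC =====
-- Pre_ excludes exactly the inputs where A raises ValueError: an empty key, a stripped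
-- ciphertext of odd length, or one that bytes.fromhex rejects (a character that is neither
-- a hex digit nor whitespace, an odd number of hex digits, or whitespace splitting a hex
-- pair, i.e. falling after an odd number of non-whitespace characters).
def Pre_decrypt (ciphertext : String) (key : String) : Prop :=
  key ≠ "" ∧ (PySem.Str.strip ciphertext).toList.length % 2 = 0 ∧
    ((PySem.Str.strip ciphertext).toList.all (fun c => (pvHexDigit? c).isSome || pvIsWS c)) = true ∧
    ((PySem.Str.strip ciphertext).toList.countP (fun c => !pvIsWS c)) % 2 = 0 ∧
    ∀ i < (PySem.Str.strip ciphertext).toList.length,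
      pvIsWS ((PySem.Str.strip ciphertext).toList.getD i ' ') = true →
      (((PySem.Str.strip ciphertext).toList.take i).countP (fun c => !pvIsWS c)) % 2 = 0
instance (ciphertext : String) (key : String) : Decidable (Pre_decrypt ciphertext key) := by
  unfold Pre_decrypt; infer_instance

def pvWitness_decrypt : String × String := ("3233  3435", "pw")

def Spec_decrypt (ciphertext : String) (key : String) (out : String) : Prop := out = decrypt_alt ciphertext key
instance (ciphertext : String) (key : String) (out : String) : Decidable (Spec_decrypt ciphertext key out) := by unfold Spec_decrypt; infer_instance

-- ===== CLAIM (what is proved, stated in full; the proofs are below) =====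
def Claim_equal_decrypt : Prop := ∀ (ciphertext : String) (key : String), Dom_decrypt ciphertext key → Pre_decrypt ciphertext key → Spec_decrypt ciphertext key (decrypt ciphertext key)

-- ===== LEMMAS AND PROOFS =====

-- keystream value used for the byte at offset j inside a block
def pvKS (kl : List Char) (j : Nat) : Nat := (kl.getD (j % kl.length) ' ').toNat

-- A's inner loop output on one block
def pvBlockOut (kl : List Char) (blk : List Nat) : List Char :=
  (List.range blk.length).map (fun j => Char.ofNat ((blk.getD j 0) ^^^ pvKS kl j))

-- common reference: every byte XORed with the keystream at its global index mod 4
def pvSpec (kl : List Char) (bytes : List Nat) : List Char :=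
  bytes.mapIdx (fun g b => Char.ofNat (b ^^^ pvKS kl (g % 4)))

theorem pv_pyRange4 (n : Nat) :
    PySem.List.pyRange 0 (n : Int) 4 = (List.range ((n + 3) / 4)).map (fun k => ((4 * k : Nat) : Int)) := by
  rw [PySem.List.pyRange_of_pos 0 (n : Int) (by norm_num)]
  have hcount : (if (0 : Int) < (n : Int) then (((n : Int) - 0 + 4 - 1) / 4).toNat else 0) = (n + 3) / 4 := by
    split_ifs with h
    · omega
    · omega
  rw [hcount]
  apply List.map_congr_left
  intro k _
  push_cast
  ring

theorem pv_blockOut_eq_mapIdx (kl : List Char) (blk : List Nat) (h : blk.length ≤ 4) :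
    pvBlockOut kl blk = blk.mapIdx (fun g b => Char.ofNat (b ^^^ pvKS kl (g % 4))) := by
  apply List.ext_getElem
  · simp [pvBlockOut]
  · intro g h1 h2
    simp only [pvBlockOut, List.getElem_map, List.getElem_range, List.getElem_mapIdx]
    have hg : g < blk.length := by simpa [pvBlockOut] using h1
    have : g % 4 = g := Nat.mod_eq_of_lt (by omega)
    rw [this, List.getD_eq_getElem blk 0 hg]

theorem pv_spec_chunk (kl : List Char) (bytes : List Nat) :
    pvSpec kl bytes = pvBlockOut kl (bytes.take 4) ++ pvSpec kl (bytes.drop 4) := by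
  conv_lhs => rw [← List.take_append_drop 4 bytes]
  rw [pvSpec, List.mapIdx_append, pv_blockOut_eq_mapIdx kl (bytes.take 4) (by simp)]
  congr 1
  by_cases h4 : 4 ≤ bytes.length
  · have hlen : (bytes.take 4).length = 4 := by simp [List.length_take]; omega
    rw [hlen, pvSpec]
    congr 1
    funext i b
    have : (i + 4) % 4 = i % 4 := by omega
    rw [this]
  · have : bytes.drop 4 = [] := List.drop_eq_nil_of_le (by omega)
    simp [this, pvSpec]

theorem pv_Ablocks (kl : List Char) (fuel : Nat) : ∀ (bytes : List Nat), bytes.length ≤ fuel →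
    (List.range ((bytes.length + 3) / 4)).flatMap
      (fun k => pvBlockOut kl (List.take 4 (List.drop (4 * k) bytes))) = pvSpec kl bytes := by
  induction fuel with
  | zero =>
    intro bytes h
    have : bytes = [] := List.eq_nil_of_length_eq_zero (by omega)
    subst this
    simp [pvSpec]
  | succ n ih =>
    intro bytes h
    rcases bytes with _ | ⟨b, bs⟩
    · simp [pvSpec]
    · have hm : ((b :: bs).length + 3) / 4 = ((List.drop 4 (b :: bs)).length + 3) / 4 + 1 := by
        simp only [List.length_drop, List.length_cons]
        omega
      rw [hm, List.range_succ_eq_map, List.flatMap_cons, List.flatMap_map]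
      have hfun : (fun a : Nat => pvBlockOut kl (List.take 4 (List.drop (4 * a.succ) (b :: bs))))
          = (fun a : Nat => pvBlockOut kl (List.take 4 (List.drop (4 * a) (List.drop 4 (b :: bs))))) := by
        funext a
        have : (4 : Nat) + 4 * a = 4 * a.succ := by omega
        rw [List.drop_drop, this]
      rw [hfun, ih (List.drop 4 (b :: bs)) (by simp only [List.length_drop, List.length_cons] at h ⊢; omega)]
      rw [pv_spec_chunk kl (b :: bs)]
      simp

theorem pv_Aside (kl : List Char) (bytes : List Nat) :
    (PySem.List.pyRange 0 (bytes.length : Int) 4).foldl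
        (fun pt i =>
          (List.range (PySem.List.slice bytes (some i) (some (i + 4))).length).foldl
            (fun pt j => pt ++ [Char.ofNat (((PySem.List.slice bytes (some i) (some (i + 4))).getD j 0) ^^^ (kl.getD (j % kl.length) ' ').toNat)])
            pt)
        [] = pvSpec kl bytes := by
  refine Eq.trans (PySem.List.foldl_congr_mem _ _
    (fun pt i => pt ++ pvBlockOut kl (PySem.List.slice bytes (some i) (some (i + 4)))) _ ?_) ?_
  · intro acc i _
    exact PySem.List.foldl_append_singleton_eq_map _ _ _
  rw [PySem.List.foldl_append_eq_flatMap, List.nil_append, pv_pyRange4, List.flatMap_map]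
  have hfun : (fun a : Nat => pvBlockOut kl (PySem.List.slice bytes (some ((4 * a : Nat) : Int)) (some (((4 * a : Nat) : Int) + 4))))
      = (fun a : Nat => pvBlockOut kl (List.take 4 (List.drop (4 * a) bytes))) := by
    funext a
    have hcast : ((4 * a : Nat) : Int) + 4 = ((4 * a + 4 : Nat) : Int) := by push_cast; ring
    rw [hcast, PySem.List.slice_natCast bytes (4 * a) (4 * a + 4)]
    congr 2
    omega
  rw [hfun]
  exact pv_Ablocks kl bytes.length bytes le_rfl

theorem pv_Bside (kl : List Char) (bytes : List Nat) :
    (PySem.List.enumerate bytes).map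
        (fun p => Char.ofNat (p.2 ^^^ PySem.List.pyGetD ((List.range 4).map (fun j => (kl.getD (j % kl.length) ' ').toNat)) (PySem.Int.mod p.1 4) 0))
      = pvSpec kl bytes := by
  apply List.ext_getElem
  · simp [pvSpec, PySem.List.length_enumerate]
  · intro g h1 h2
    have hg : g < bytes.length := by
      simpa [PySem.List.length_enumerate] using h1
    simp only [List.getElem_map, PySem.List.getElem_enumerate]
    have hmod : PySem.Int.mod ((0 : Int) + (g : Nat)) 4 = ((g % 4 : Nat) : Int) := by
      simp [PySem.Int.mod, Int.fmod_eq_emod]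
      try omega
    rw [hmod, PySem.List.pyGetD_natCast]
    have hlt : g % 4 < 4 := by omega
    simp [pvSpec, pvKS, hlt]

theorem pv_ports_equal (ciphertext key : String) : decrypt ciphertext key = decrypt_alt ciphertext key := by
  unfold decrypt decrypt_alt
  dsimp only
  by_cases h1 : key.toList.isEmpty = true
  · rw [if_pos h1, if_pos h1]
  · rw [if_neg h1, if_neg h1]
    by_cases h2 : (PySem.Str.strip ciphertext).toList.length % 2 ≠ 0
    · rw [if_pos h2, if_pos h2]
    · rw [if_neg h2, if_neg h2]
      cases hfh : pvFromhex? (PySem.Str.strip ciphertext).toList with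
      | none => rfl
      | some bytesData =>
        dsimp only
        rw [pv_Aside key.toList bytesData, pv_Bside key.toList bytesData]

-- ===== VERDICT (by name: the statement is the Claim_ definition above) =====
theorem decrypt_spec : Claim_equal_decrypt := by
  intro ciphertext key _ _
  unfold Spec_decrypt
  exact pv_ports_equal ciphertext key
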